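-- pv_equiv track=rewrite | github.com/lukacslacko/csaszar | rotation_z6.py | trace_faces_z6
-- ===== SOURCE A (Python) =====
-- def trace_faces_z6(rot_even, rot_odd, N=12):
--     """Z_6-symmetric rotation system defined by rot_even, rot_odd."""
--     pos_even = {d: i for i, d in enumerate(rot_even)}
--     pos_odd = {d: i for i, d in enumerate(rot_odd)}
--     L = len(rot_even)
--     cap = N * (N - 1)
--
--     def succ(vertex, x):
--         if vertex % 2 == 0:
--             return rot_even[(pos_even[x] + 1) % L]
--         return rot_odd[(pos_odd[x] + 1) % L]
--
--     visited = set()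
--     faces = []
--     for a0 in range(N):
--         rot_a = rot_even if a0 % 2 == 0 else rot_odd
--         for d in rot_a:
--             b0 = (a0 + d) % N
--             if (a0, b0) in visited:
--                 continue
--             face = []
--             a, b = a0, b0
--             for _ in range(cap + 1):
--                 if (a, b) in visited:
--                     break
--                 visited.add((a, b))
--                 face.append(a)
--                 diff = (a - b) % N
--                 next_d = succ(b, diff)
--                 a, b = b, (b + next_d) % N
--             faces.append(face)
--     return faces
-- ===== SOURCE B (Python) =====
-- def trace_faces_z6(rot_even, rot_odd, N=12):
--     """Z_6-symmetric rotation system: encode every dart as an integer slot,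
--     build the face-successor permutation over slots as a flat int array, and
--     read the faces off as the cycles of that permutation with a boolean
--     seen-array, in slot order."""
--     rots = [rot_even if a % 2 == 0 else rot_odd for a in range(N)]
--     base = [0]
--     for r in rots:
--         base.append(base[-1] + len(r))
--     S = base[-1] if base else 0
--     vert = []
--     for a, r in enumerate(rots):
--         vert.extend([a] * len(r))
--     perm = []
--     for a, r in enumerate(rots):
--         for d in r:
--             b = (a + d) % N
--             rb = rots[b]
--             p = rb.index((-d) % N)
--             perm.append(base[b] + (p + 1) % len(rb))
--     seen = [False] * S
--     faces = []
--     for s0 in range(S):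
--         if seen[s0]:
--             continue
--         face = []
--         s = s0
--         while not seen[s]:
--             seen[s] = True
--             face.append(vert[s])
--             s = perm[s]
--         faces.append(face)
--     return faces
-- ===== Notes on version B (the rewrite author's own statement) =====
-- stated objective: alternative
-- what changed: A walks faces edge by edge, keyed by (vertex,vertex) pairs in a visited set, recomputing rotation successors via position dicts inside a cap-bounded loop; B renames every dart to an integer slot, builds the face-successor permutation of slots as one flat int array (base offsets + rotation index), and reads the faces off as the cycles of that integer permutation with a boolean seen-array and an unbounded while loop.
-- outside the precondition, e.g. on trace_faces_z6([1], [1, 3], 2): A returns [[0, 1]], B returns [[0, 1], [1]]; on trace_faces_z6([1, 0], [1, 0], 2): A returns [[0, 1, 1], [0]], B returns [[0, 1, 1, 0]]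
import Mathlib
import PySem

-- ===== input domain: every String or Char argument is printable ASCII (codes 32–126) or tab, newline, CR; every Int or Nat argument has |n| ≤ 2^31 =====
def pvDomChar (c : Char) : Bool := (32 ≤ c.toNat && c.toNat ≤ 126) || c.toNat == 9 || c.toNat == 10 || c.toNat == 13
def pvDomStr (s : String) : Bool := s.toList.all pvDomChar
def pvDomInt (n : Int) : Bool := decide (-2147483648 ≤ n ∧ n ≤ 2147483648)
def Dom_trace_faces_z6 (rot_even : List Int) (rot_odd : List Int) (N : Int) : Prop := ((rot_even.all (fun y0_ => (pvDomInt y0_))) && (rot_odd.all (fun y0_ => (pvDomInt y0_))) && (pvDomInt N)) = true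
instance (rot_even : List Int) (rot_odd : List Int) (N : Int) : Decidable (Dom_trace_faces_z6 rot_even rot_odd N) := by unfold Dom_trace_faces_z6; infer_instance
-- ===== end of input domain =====

-- B replaces A's edge-keyed walk (visited set of vertex pairs, rotation-dict
-- successor lookups inside a cap-bounded loop) by an integer-slot permutation
-- array whose cycles, extracted with a boolean seen-array, are the faces.

-- ===== PORT A =====

-- {d: i for i, d in enumerate(xs)}  (later duplicates overwrite)
def pvPos (xs : List Int) : PySem.Dict Int Int :=
  (PySem.List.enumerate xs 0).foldl (fun d p => d.insert p.2 p.1) PySem.Dict.empty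

-- A's `succ(vertex, x)`; `none` models the KeyError / ZeroDivisionError Python
-- raises there (outside Pre_).  Note A uses L = len(rot_even) in BOTH branches.
def pvSuccA (rot_even rot_odd : List Int) (vertex x : Int) : Option Int :=
  if PySem.Int.mod vertex 2 = 0 then
    match (pvPos rot_even).get? x with
    | none => none
    | some i => PySem.List.pyGet? rot_even (PySem.Int.mod (i + 1) (rot_even.length : Int))
  else
    match (pvPos rot_odd).get? x with
    | none => none
    | some i =>
      if (rot_even.length : Int) = 0 then none   -- Python: ZeroDivisionError on % L
      else PySem.List.pyGet? rot_odd (PySem.Int.mod (i + 1) (rot_even.length : Int))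

-- A's inner `for _ in range(cap+1)` walk; `none` from succ = Python raise (outside Pre_).
def pvWalkA (rot_even rot_odd : List Int) (N : Int) :
    Nat → PySem.Set (Int × Int) → List Int → Int → Int → PySem.Set (Int × Int) × List Int
  | 0, vis, face, _, _ => (vis, face)
  | fuel + 1, vis, face, a, b =>
    if (a, b) ∈ vis then (vis, face)
    else
      let vis' := PySem.Set.add vis (a, b)
      let face' := face ++ [a]
      match pvSuccA rot_even rot_odd b (PySem.Int.mod (a - b) N) with
      | none => (vis', face')
      | some d => pvWalkA rot_even rot_odd N fuel vis' face' b (PySem.Int.mod (b + d) N)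

def trace_faces_z6 (rot_even : List Int) (rot_odd : List Int) (N : Int) : List (List Int) :=
  let cap := N * (N - 1)
  ((PySem.List.pyRange 0 N 1).foldl
    (fun st a0 =>
      (if PySem.Int.mod a0 2 = 0 then rot_even else rot_odd).foldl
        (fun st d =>
          let b0 := PySem.Int.mod (a0 + d) N
          if (a0, b0) ∈ st.1 then st
          else
            let r := pvWalkA rot_even rot_odd N (cap + 1).toNat st.1 [] a0 b0
            (r.1, st.2 ++ [r.2]))
        st)
    (PySem.Set.empty, ([] : List (List Int)))).2

-- ===== PORT B =====

-- rots = [rot_even if a % 2 == 0 else rot_odd for a in range(N)]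
def pvRots (rot_even rot_odd : List Int) (N : Int) : List (List Int) :=
  (PySem.List.pyRange 0 N 1).map (fun a => if PySem.Int.mod a 2 = 0 then rot_even else rot_odd)

-- base = [0]; for r in rots: base.append(base[-1] + len(r))
def pvBase (rots : List (List Int)) : List Int :=
  rots.foldl (fun bs r => bs ++ [bs.getLast! + (r.length : Int)]) [0]

-- vert = []; for a, r in enumerate(rots): vert.extend([a] * len(r))
def pvVert (rots : List (List Int)) : List Int :=
  (PySem.List.enumerate rots 0).foldl (fun v p => v ++ List.replicate p.2.length p.1) []

-- one appended perm entry: base[b] + (rb.index((-d) % N) + 1) % len(rb);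
-- none = the ValueError/IndexError Python raises there (outside Pre_)
def pvPermEntry (rots : List (List Int)) (base : List Int) (N a d : Int) : Option Int :=
  let b := PySem.Int.mod (a + d) N
  match PySem.List.pyGet? rots b with
  | none => none
  | some rb =>
    match PySem.List.index? rb (PySem.Int.mod (-d) N) with
    | none => none
    | some p =>
      match PySem.List.pyGet? base b with
      | none => none
      | some bb => some (bb + PySem.Int.mod ((p : Int) + 1) (rb.length : Int))

-- perm = []; for a, r in enumerate(rots): for d in r: perm.append(...)
def pvPerm (rots : List (List Int)) (base : List Int) (N : Int) : Option (List Int) :=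
  (PySem.List.enumerate rots 0).foldl
    (fun acc p =>
      p.2.foldl
        (fun acc d =>
          acc.bind (fun l => (pvPermEntry rots base N p.1 d).map (fun e => l ++ [e])))
        acc)
    (some [])

-- seen[s] = True  (Python index semantics: negative s counts from the end;
-- out of range would raise in Python — unreachable inside Pre_)
def pySetTrue (l : List Bool) (i : Int) : List Bool :=
  if 0 ≤ i then l.set i.toNat true else l.set (l.length + i).toNat true

-- while not seen[s]: seen[s] = True; face.append(vert[s]); s = perm[s]
-- Fuel len(seen)+1 covers the while loop exactly: every iteration but the last
-- marks a previously-False entry True.  `none` lookups = Python IndexError (outside Pre_).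
def pvWalkB (perm vert : List Int) :
    Nat → List Bool → List Int → Int → List Bool × List Int
  | 0, seen, face, _ => (seen, face)
  | fuel + 1, seen, face, s =>
    match PySem.List.pyGet? seen s with
    | none => (seen, face)
    | some true => (seen, face)
    | some false =>
      let seen' := pySetTrue seen s
      match PySem.List.pyGet? vert s, PySem.List.pyGet? perm s with
      | some v, some s' => pvWalkB perm vert fuel seen' (face ++ [v]) s'
      | _, _ => (seen', face)

def trace_faces_z6_alt (rot_even : List Int) (rot_odd : List Int) (N : Int) : List (List Int) :=
  let rots := pvRots rot_even rot_odd N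
  let base := pvBase rots
  let S := base.getLast!          -- base[-1] (base is never empty)
  let vert := pvVert rots
  match pvPerm rots base N with
  | none => []                    -- Python raises while building perm (outside Pre_)
  | some perm =>
    ((PySem.List.pyRange 0 S 1).foldl
      (fun st s0 =>
        match PySem.List.pyGet? st.1 s0 with
        | some true => st
        | some false =>
          let r := pvWalkB perm vert (S.toNat + 1) st.1 [] s0
          (r.1, st.2 ++ [r.2])
        | none => st)             -- unreachable: 0 ≤ s0 < S = len(seen)
      (List.replicate S.toNat false, ([] : List (List Int)))).2

-- ===== PRECONDITION & SPEC =====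

-- Pre_ restricts to the natural domain of a combinatorial rotation system:
-- equal-length rotation lists whose darts are pairwise distinct and nonzero
-- modulo N (each vertex lists distinct neighbours, no self-loops) and closed
-- under dart reversal (without closure A raises KeyError and B ValueError).
-- Outside this domain — unequal lengths, repeated or zero residues — several
-- rotation slots can denote one directed edge and the two implementations
-- legitimately disagree on how such aliased slots are grouped into faces.
def Pre_trace_faces_z6 (rot_even : List Int) (rot_odd : List Int) (N : Int) : Prop :=
  N ≤ 0 ∨
    (rot_even.length = rot_odd.length ∧
     (∀ r ∈ [rot_even, rot_odd],
        r.Pairwise (fun d d' => PySem.Int.mod d N ≠ PySem.Int.mod d' N) ∧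
        ∀ d ∈ r, PySem.Int.mod d N ≠ 0) ∧
     ∀ a ∈ PySem.List.pyRange 0 N 1,
       ∀ d ∈ (if PySem.Int.mod a 2 = 0 then rot_even else rot_odd),
         PySem.Int.mod (-d) N ∈
           (if PySem.Int.mod (PySem.Int.mod (a + d) N) 2 = 0 then rot_even else rot_odd))

instance (rot_even : List Int) (rot_odd : List Int) (N : Int) :
    Decidable (Pre_trace_faces_z6 rot_even rot_odd N) := by
  unfold Pre_trace_faces_z6; infer_instance

def pvWitness_trace_faces_z6 : List Int × List Int × Int := ([1, 11], [1, 11], 12)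

def Spec_trace_faces_z6 (rot_even : List Int) (rot_odd : List Int) (N : Int) (out : List (List Int)) : Prop := out = trace_faces_z6_alt rot_even rot_odd N
instance (rot_even : List Int) (rot_odd : List Int) (N : Int) (out : List (List Int)) : Decidable (Spec_trace_faces_z6 rot_even rot_odd N out) := by unfold Spec_trace_faces_z6; infer_instance

-- ===== CLAIM (what is proved, stated in full; the proofs are below) =====
def Claim_equal_trace_faces_z6 : Prop := ∀ (rot_even : List Int) (rot_odd : List Int) (N : Int), Dom_trace_faces_z6 rot_even rot_odd N → Pre_trace_faces_z6 rot_even rot_odd N → Spec_trace_faces_z6 rot_even rot_odd N (trace_faces_z6 rot_even rot_odd N)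

-- ===== LEMMAS AND PROOFS =====

-- bundled Pre_ hypotheses for the positive-N case
def pvOk (re ro : List Int) (N : Int) : Prop :=
  0 < N ∧ re.length = ro.length ∧
  (∀ r ∈ [re, ro],
     r.Pairwise (fun d d' => PySem.Int.mod d N ≠ PySem.Int.mod d' N) ∧
     ∀ d ∈ r, PySem.Int.mod d N ≠ 0) ∧
  (∀ a ∈ PySem.List.pyRange 0 N 1,
     ∀ d ∈ (if PySem.Int.mod a 2 = 0 then re else ro),
       PySem.Int.mod (-d) N ∈
         (if PySem.Int.mod (PySem.Int.mod (a + d) N) 2 = 0 then re else ro))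

-- the rotation at a vertex, the dart in slot (a, j), the edge target
def pvRotAt (re ro : List Int) (a : Int) : List Int :=
  if PySem.Int.mod a 2 = 0 then re else ro

def pvDart (re ro : List Int) (a : Int) (j : Nat) : Int := (pvRotAt re ro a).getD j 0

def pvTgt (re ro : List Int) (N a : Int) (j : Nat) : Int :=
  PySem.Int.mod (a + pvDart re ro a j) N

def pvEdge (re ro : List Int) (N : Int) (a j : Nat) : Int × Int :=
  ((a : Int), pvTgt re ro N (a : Int) j)

-- target slot of slot (a, j) under the face-successor map
def pvB' (re ro : List Int) (N : Int) (a j : Nat) : Nat := (pvTgt re ro N (a:Int) j).toNat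

def pvJ' (re ro : List Int) (N : Int) (a j : Nat) : Nat :=
  ((PySem.List.index? (pvRotAt re ro (pvTgt re ro N (a:Int) j))
      (PySem.Int.mod (-(pvDart re ro (a:Int) j)) N)).getD 0 + 1) % re.length

-- the Int value pvPermEntry returns on slot (a, j)
def pvFVal (re ro : List Int) (N a : Int) (d : Int) : Int :=
  (((PySem.Int.mod (a + d) N).toNat * re.length +
    ((PySem.List.index? (pvRotAt re ro (PySem.Int.mod (a + d) N))
        (PySem.Int.mod (-d) N)).getD 0 + 1) % re.length : Nat) : Int)

-- what the built tables are (proved below)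
def pvPermSpec (re ro : List Int) (N : Int) : List Int :=
  (List.range N.toNat).flatMap
    (fun (a : Nat) => (pvRotAt re ro (a : Int)).map (fun d => pvFVal re ro N (a : Int) d))

def pvVertSpec (re ro : List Int) (N : Int) : List Int :=
  (List.range N.toNat).flatMap (fun (a : Nat) => List.replicate re.length ((a : Int)))

-- simulation invariant between A's visited edge set and B's seen array
def pvInv (re ro : List Int) (N : Int) (vis : PySem.Set (Int × Int)) (seen : List Bool) : Prop :=
  seen.length = N.toNat * re.length ∧
  (∀ a j, a < N.toNat → j < re.length →
     (pvEdge re ro N a j ∈ vis ↔ seen.getD (a * re.length + j) false = true)) ∧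
  (∀ e, e ∈ vis → ∃ a j, a < N.toNat ∧ j < re.length ∧ e = pvEdge re ro N a j)

-- ---- basic facts ----

theorem pvRotAt_length {re ro : List Int} {N : Int} (h : pvOk re ro N) (a : Int) :
    (pvRotAt re ro a).length = re.length := by
  unfold pvRotAt; split
  · rfl
  · exact h.2.1.symm

theorem pvRotAt_nodup {re ro : List Int} {N : Int} (h : pvOk re ro N) (a : Int) :
    (pvRotAt re ro a).Nodup := by
  have hre := (h.2.2.1 re (by simp)).1
  have hro := (h.2.2.1 ro (by simp)).1
  unfold pvRotAt; split
  · exact hre.imp (fun hmod heq => hmod (by rw [heq]))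
  · exact hro.imp (fun hmod heq => hmod (by rw [heq]))

theorem pvTgt_bounds {re ro : List Int} {N a : Int} (hN : 0 < N) (j : Nat) :
    0 ≤ pvTgt re ro N a j ∧ pvTgt re ro N a j < N := by
  exact ⟨PySem.Int.mod_nonneg _ hN, PySem.Int.mod_lt _ hN⟩

theorem pvDart_mem {re ro : List Int} {N : Int} (h : pvOk re ro N) (a : Int) {j : Nat}
    (hj : j < re.length) : pvDart re ro a j ∈ pvRotAt re ro a := by
  have hlen : j < (pvRotAt re ro a).length := by rw [pvRotAt_length h]; exact hj
  unfold pvDart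
  rw [List.getD_eq_getElem _ 0 hlen]
  exact List.getElem_mem hlen

theorem pvClosure {re ro : List Int} {N : Int} (h : pvOk re ro N) {a j : Nat}
    (ha : a < N.toNat) (hj : j < re.length) :
    PySem.Int.mod (-(pvDart re ro (a:Int) j)) N ∈ pvRotAt re ro (pvTgt re ro N (a:Int) j) := by
  have hN := h.1
  have hmem : (a : Int) ∈ PySem.List.pyRange 0 N 1 := by
    rw [PySem.List.mem_pyRange_one]
    constructor
    · exact Int.natCast_nonneg a
    · omega
  exact h.2.2.2 (a : Int) hmem (pvDart re ro (a:Int) j) (pvDart_mem h _ hj)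

theorem pvLn_le {re ro : List Int} {N : Int} (h : pvOk re ro N) :
    re.length ≤ (N - 1).toNat := by
  have hN := h.1
  have hp := (h.2.2.1 re (by simp)).1
  have hnz := (h.2.2.1 re (by simp)).2
  have hnd : (re.map (fun d => PySem.Int.mod d N)).Nodup := by
    rw [List.nodup_iff_pairwise_ne]
    rw [List.pairwise_map]
    exact hp
  have hsub : (re.map (fun d => PySem.Int.mod d N)).toFinset ⊆ Finset.Ico 1 N := by
    intro x hx
    rw [List.mem_toFinset, List.mem_map] at hx
    obtain ⟨d, hd, rfl⟩ := hx
    rw [Finset.mem_Ico]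
    have h0 := PySem.Int.mod_nonneg d hN
    have h1 := PySem.Int.mod_lt d hN
    have h2 := hnz d hd
    omega
  have hcard := Finset.card_le_card hsub
  rw [List.toFinset_card_of_nodup hnd] at hcard
  rw [List.length_map] at hcard
  rwa [Int.card_Ico] at hcard

-- slot/edge injectivity
theorem pvSlot_inj {L a j a' j' : Nat} (hj : j < L) (hj' : j' < L)
    (heq : a * L + j = a' * L + j') : a = a' ∧ j = j' := by
  have hL : 0 < L := by omega
  have h1 : (L * a + j) / L = a := by
    rw [Nat.mul_add_div hL, Nat.div_eq_of_lt hj]; omega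
  have h2 : (L * a' + j') / L = a' := by
    rw [Nat.mul_add_div hL, Nat.div_eq_of_lt hj']; omega
  have haa : a = a' := by
    rw [← h1, ← h2, Nat.mul_comm L a, Nat.mul_comm L a', heq]
  constructor
  · exact haa
  · subst haa; omega

theorem pvEdge_inj {re ro : List Int} {N : Int} (h : pvOk re ro N) {a j a' j' : Nat}
    (ha : a < N.toNat) (hj : j < re.length) (ha' : a' < N.toNat) (hj' : j' < re.length)
    (heq : pvEdge re ro N a j = pvEdge re ro N a' j') : a = a' ∧ j = j' := by
  have hN := h.1
  unfold pvEdge at heq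
  obtain ⟨h1, h2⟩ := Prod.mk.injEq .. ▸ heq
  have haa : a = a' := by exact_mod_cast h1
  subst haa
  refine ⟨rfl, ?_⟩
  by_contra hne
  -- darts at distinct positions have distinct residues, but tgt equality forces equality
  have hmod : PySem.Int.mod (pvDart re ro (a:Int) j) N
      = PySem.Int.mod (pvDart re ro (a:Int) j') N := by
    unfold pvTgt at h2
    rw [PySem.Int.mod_eq_emod_of_pos hN, PySem.Int.mod_eq_emod_of_pos hN] at h2 ⊢
    rw [Int.emod_eq_emod_iff_emod_sub_eq_zero] at h2 ⊢
    have heq2 : (a:Int) + pvDart re ro (a:Int) j - ((a:Int) + pvDart re ro (a:Int) j')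
        = pvDart re ro (a:Int) j - pvDart re ro (a:Int) j' := by ring
    rwa [heq2] at h2
  have hlr : j < (pvRotAt re ro (a:Int)).length := by rw [pvRotAt_length h]; exact hj
  have hlr' : j' < (pvRotAt re ro (a:Int)).length := by rw [pvRotAt_length h]; exact hj'
  have hpw : (pvRotAt re ro (a:Int)).Pairwise
      (fun d d' => PySem.Int.mod d N ≠ PySem.Int.mod d' N) := by
    unfold pvRotAt; split
    · exact (h.2.2.1 re (by simp)).1
    · exact (h.2.2.1 ro (by simp)).1
  rw [List.pairwise_iff_getElem] at hpw
  have hdj : pvDart re ro (a:Int) j = (pvRotAt re ro (a:Int))[j] := List.getD_eq_getElem _ 0 hlr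
  have hdj' : pvDart re ro (a:Int) j' = (pvRotAt re ro (a:Int))[j'] := List.getD_eq_getElem _ 0 hlr'
  rcases Nat.lt_or_ge j j' with hlt | hge
  · exact hpw j j' hlr hlr' hlt (hdj ▸ hdj' ▸ hmod)
  · have hlt : j' < j := by omega
    exact hpw j' j hlr' hlr hlt (hdj' ▸ hdj ▸ hmod.symm)

theorem pvPosAux_get? {xs : List Int} (hnd : xs.Nodup) :
    ∀ (s : Int) (d0 : PySem.Dict Int Int) (x : Int),
      ((PySem.List.enumerate xs s).foldl (fun d p => d.insert p.2 p.1) d0).get? x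
        = (match PySem.List.index? xs x with
           | some p => some (s + (p : Int))
           | none => d0.get? x) := by
  induction xs with
  | nil =>
    intro s d0 x
    simp [PySem.List.enumerate_nil, PySem.List.index?_eq_idxOf?]
  | cons y xs ih =>
    intro s d0 x
    rw [PySem.List.enumerate_cons, List.foldl_cons]
    rw [ih hnd.of_cons (s+1) (d0.insert y s) x]
    by_cases hyx : y = x
    · subst hyx
      have hnm : y ∉ xs := (List.nodup_cons.mp hnd).1
      rw [(PySem.List.index?_eq_none_iff xs y).mpr hnm, PySem.List.index?_cons_self]
      simp
    · rw [PySem.List.index?_cons_of_ne xs hyx]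
      cases hm : PySem.List.index? xs x with
      | some p => simp only [Option.map_some]; push_cast; ring_nf
      | none =>
        simp only [Option.map_none]
        rw [PySem.Dict.get?_insert]
        simp [Ne.symm hyx]

-- A's pos dict on a duplicate-free list is first-index lookup
theorem pvPos_get? {xs : List Int} (hnd : xs.Nodup) (x : Int) :
    (pvPos xs).get? x = (PySem.List.index? xs x).map (fun p => (p : Int)) := by
  unfold pvPos
  rw [pvPosAux_get? hnd 0 PySem.Dict.empty x]
  cases hm : PySem.List.index? xs x with
  | some p => simp
  | none => simp [PySem.Dict.get?_empty]

-- ---- table characterizations ----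

theorem pvRots_length (re ro : List Int) (N : Int) :
    (pvRots re ro N).length = N.toNat := by
  unfold pvRots
  rw [List.length_map, PySem.List.length_pyRange_one]
  simp

theorem pvRots_getElem? (re ro : List Int) {N : Int} {k : Nat} (hk : k < N.toNat) :
    (pvRots re ro N)[k]? = some (pvRotAt re ro (k : Int)) := by
  unfold pvRots
  rw [PySem.List.pyRange_one, List.map_map, List.getElem?_map]
  rw [List.getElem?_range (show k < ((N:Int) - 0).toNat by omega)]
  simp only [Option.map_some, Function.comp_apply, zero_add]
  rfl

theorem pvRots_all_len {re ro : List Int} {N : Int} (h : pvOk re ro N) :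
    ∀ r ∈ pvRots re ro N, r.length = re.length := by
  intro r hr
  unfold pvRots at hr
  rw [List.mem_map] at hr
  obtain ⟨a, _, rfl⟩ := hr
  split
  · rfl
  · exact h.2.1.symm

theorem pvBaseAux {L : Nat} :
    ∀ (rs : List (List Int)) (m : Nat) (acc : List Int),
      (∀ r ∈ rs, r.length = L) →
      acc = (List.range (m + 1)).map (fun k => ((k * L : Nat) : Int)) →
      rs.foldl (fun bs r => bs ++ [bs.getLast! + (r.length : Int)]) acc
        = (List.range (m + rs.length + 1)).map (fun k => ((k * L : Nat) : Int)) := by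
  intro rs
  induction rs with
  | nil => intro m acc _ hacc; simpa using hacc
  | cons r rs ih =>
    intro m acc hlen hacc
    rw [List.foldl_cons]
    have hgl : acc.getLast! = ((m * L : Nat) : Int) := by
      rw [hacc, List.range_succ, List.map_append, List.map_singleton]
      rw [List.getLast!_eq_getLast?_getD, List.getLast?_concat]
      rfl
    have hx : ((m * L : Nat) : Int) + (L : Int) = (((m + 1) * L : Nat) : Int) := by
      push_cast; ring
    have hstep : acc ++ [acc.getLast! + (r.length : Int)]
        = (List.range (m + 1 + 1)).map (fun k => ((k * L : Nat) : Int)) := by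
      conv_rhs => rw [List.range_succ, List.map_append, List.map_singleton]
      rw [hgl, hacc, hlen r (by simp), hx]
    rw [hstep, ih (m + 1) _ (fun r' hr' => hlen r' (by simp [hr'])) rfl]
    have harith : m + 1 + rs.length + 1 = m + (r :: rs).length + 1 := by
      simp [List.length_cons]; omega
    rw [harith]

theorem pvBase_spec {rots : List (List Int)} {L : Nat} (h : ∀ r ∈ rots, r.length = L) :
    pvBase rots = (List.range (rots.length + 1)).map (fun k => ((k * L : Nat) : Int)) := by
  unfold pvBase
  rw [pvBaseAux rots 0 [0] h (by simp)]
  simp only [Nat.zero_add]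

theorem pvBase_getLast {rots : List (List Int)} {L : Nat} (h : ∀ r ∈ rots, r.length = L) :
    (pvBase rots).getLast! = ((rots.length * L : Nat) : Int) := by
  rw [pvBase_spec h, List.range_succ, List.map_append, List.map_singleton]
  rw [List.getLast!_eq_getLast?_getD, List.getLast?_concat]
  rfl

theorem pvBase_pyGet? {rots : List (List Int)} {L : Nat} (h : ∀ r ∈ rots, r.length = L)
    {k : Nat} (hk : k ≤ rots.length) :
    PySem.List.pyGet? (pvBase rots) (k : Int) = some ((k * L : Nat) : Int) := by
  rw [pvBase_spec h, PySem.List.pyGet?_natCast]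
  rw [List.getElem?_map, List.getElem?_range (by omega)]
  rfl

theorem pvFlatMap_ext {α : Type} (l : List Nat) {g1 g2 : Nat → List α}
    (h : ∀ a, g1 a = g2 a) : l.flatMap g1 = l.flatMap g2 := by
  have : g1 = g2 := funext h
  rw [this]

theorem pvVertAux {L : Nat} :
    ∀ (rs : List (List Int)) (s : Nat) (acc : List Int),
      (∀ r ∈ rs, r.length = L) →
      (PySem.List.enumerate rs ((s : Nat) : Int)).foldl
          (fun v p => v ++ List.replicate p.2.length p.1) acc
        = acc ++ (List.range rs.length).flatMap
            (fun a => List.replicate L (((s + a : Nat) : Int))) := by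
  intro rs
  induction rs with
  | nil => intro s acc _; simp [PySem.List.enumerate_nil]
  | cons r rs ih =>
    intro s acc hlen
    rw [PySem.List.enumerate_cons, List.foldl_cons]
    have hcast : ((s : Nat) : Int) + 1 = (((s + 1 : Nat)) : Int) := by push_cast; ring
    rw [hcast, ih (s + 1) _ (fun r' hr' => hlen r' (by simp [hr']))]
    rw [hlen r (by simp), List.append_assoc]
    rw [List.length_cons, List.range_succ_eq_map, List.flatMap_cons, List.flatMap_map]
    congr 1
    have h0 : (s + 0 : Nat) = s := by omega
    rw [h0]
    congr 1
    apply pvFlatMap_ext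
    intro a
    congr 2
    omega

theorem pvVert_spec {rots : List (List Int)} {L : Nat} (h : ∀ r ∈ rots, r.length = L) :
    pvVert rots = (List.range rots.length).flatMap (fun (a : Nat) => List.replicate L ((a : Int))) := by
  unfold pvVert
  have h0 : (0 : Int) = ((0 : Nat) : Int) := rfl
  rw [h0, pvVertAux rots 0 [] h, List.nil_append]
  apply pvFlatMap_ext
  intro a
  congr 2
  omega

-- indexing a flatMap of uniform-length blocks
theorem pvBlocks_length {α : Type} (blk : Nat → List α) (n L : Nat)
    (h : ∀ i, i < n → (blk i).length = L) :
    ((List.range n).flatMap blk).length = n * L := by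
  rw [List.length_flatMap]
  have hm : (List.range n).map (fun i => (blk i).length) = List.replicate n L := by
    rw [List.eq_replicate_iff]
    constructor
    · simp
    · intro b hb
      rw [List.mem_map] at hb
      obtain ⟨i, hi, rfl⟩ := hb
      exact h i (List.mem_range.mp hi)
  rw [hm, List.sum_replicate, smul_eq_mul]

theorem pvBlocks_getElem? {α : Type} (blk : Nat → List α) (n L : Nat)
    (h : ∀ i, i < n → (blk i).length = L) {a j : Nat} (ha : a < n) (hj : j < L) :
    ((List.range n).flatMap blk)[a * L + j]? = (blk a)[j]? := by
  induction n with
  | zero => omega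
  | succ n ih =>
    rw [List.range_succ, List.flatMap_append, List.flatMap_singleton]
    have hlen : ((List.range n).flatMap blk).length = n * L :=
      pvBlocks_length blk n L (fun i hi => h i (by omega))
    rcases Nat.lt_or_ge a n with han | han
    · rw [List.getElem?_append_left (by rw [hlen]; calc
        a * L + j < a * L + L := by omega
        _ = (a + 1) * L := by ring
        _ ≤ n * L := Nat.mul_le_mul_right L (by omega))]
      exact ih (fun i hi => h i (by omega)) han
    · have han' : a = n := by omega
      subst han'
      rw [List.getElem?_append_right (by rw [hlen]; omega)]
      rw [hlen]
      congr 1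
      omega

-- option-threaded appending fold
theorem pvOptFold {α β : Type} (g : α → Option β) (f : α → β) (xs : List α) (l : List β)
    (h : ∀ x ∈ xs, g x = some (f x)) :
    xs.foldl (fun acc x => acc.bind (fun l => (g x).map (fun e => l ++ [e]))) (some l)
      = some (l ++ xs.map f) := by
  induction xs generalizing l with
  | nil => simp
  | cons x xs ih =>
    rw [List.foldl_cons]
    have hx := h x (by simp)
    rw [show (some l).bind (fun l => (g x).map (fun e => l ++ [e]))
        = some (l ++ [f x]) by rw [hx]; rfl]
    rw [ih _ (fun x' hx' => h x' (by simp [hx']))]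
    simp

theorem pvPermEntry_eq {re ro : List Int} {N : Int} (h : pvOk re ro N) {a : Nat}
    (ha : a < N.toNat) {d : Int} (hd : d ∈ pvRotAt re ro (a : Int)) :
    pvPermEntry (pvRots re ro N) (pvBase (pvRots re ro N)) N (a : Int) d
      = some (pvFVal re ro N (a : Int) d) := by
  have hN := h.1
  unfold pvPermEntry
  dsimp only
  set b := PySem.Int.mod ((a:Int) + d) N with hbdef
  have hb0 : 0 ≤ b := PySem.Int.mod_nonneg _ hN
  have hbN : b < N := PySem.Int.mod_lt _ hN
  have hbn : b.toNat < N.toNat := by omega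
  have hbc : ((b.toNat : Nat) : Int) = b := Int.toNat_of_nonneg hb0
  have hrots : PySem.List.pyGet? (pvRots re ro N) b = some (pvRotAt re ro b) := by
    rw [PySem.List.pyGet?_of_nonneg _ hb0, pvRots_getElem? re ro hbn, hbc]
  rw [hrots]
  dsimp only
  have hx : PySem.Int.mod (-d) N ∈ pvRotAt re ro b := by
    have hmem : (a : Int) ∈ PySem.List.pyRange 0 N 1 := by
      rw [PySem.List.mem_pyRange_one]
      exact ⟨Int.natCast_nonneg a, by omega⟩
    exact h.2.2.2 (a:Int) hmem d hd
  obtain ⟨p, hp⟩ := Option.isSome_iff_exists.mp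
    ((PySem.List.index?_isSome_iff _ _).mpr hx)
  rw [hp]
  dsimp only
  have hbase : PySem.List.pyGet? (pvBase (pvRots re ro N)) b
      = some ((b.toNat * re.length : Nat) : Int) := by
    rw [← hbc]
    exact pvBase_pyGet? (pvRots_all_len h) (by rw [pvRots_length]; omega)
  rw [hbase]
  dsimp only
  have hlenb : (pvRotAt re ro b).length = re.length := pvRotAt_length h b
  have hL : 0 < re.length := by
    have := pvRotAt_length h (a:Int)
    have hne := List.length_pos_of_mem hd
    omega
  have hmodc : PySem.Int.mod ((p:Int) + 1) ((pvRotAt re ro b).length : Int)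
      = (((p + 1) % re.length : Nat) : Int) := by
    rw [hlenb, show ((p:Int) + 1) = (((p+1 : Nat)) : Int) by push_cast; ring,
        PySem.Int.mod_natCast]
  rw [hmodc]
  unfold pvFVal
  rw [hp]
  simp only [Option.getD_some]
  congr 1

theorem pvPermAux {re ro : List Int} {N : Int} (h : pvOk re ro N) :
    ∀ (as : List Nat) (l : List Int), (∀ x ∈ as, x < N.toNat) →
      as.foldl
        (fun acc (a : Nat) =>
          (pvRotAt re ro (a : Int)).foldl
            (fun acc d => acc.bind (fun l =>
              (pvPermEntry (pvRots re ro N) (pvBase (pvRots re ro N)) N (a : Int) d).map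
                (fun e => l ++ [e])))
            acc)
        (some l)
      = some (l ++ as.flatMap (fun (a : Nat) =>
          (pvRotAt re ro (a : Int)).map (fun d => pvFVal re ro N (a : Int) d))) := by
  intro as
  induction as with
  | nil => intro l _; simp
  | cons a as ih =>
    intro l hb
    rw [List.foldl_cons]
    rw [pvOptFold _ (fun d => pvFVal re ro N (a : Int) d) _ l
        (fun d hd => pvPermEntry_eq h (hb a (by simp)) hd)]
    rw [ih _ (fun x hx => hb x (by simp [hx]))]
    simp

theorem pvPerm_spec {re ro : List Int} {N : Int} (h : pvOk re ro N) :
    pvPerm (pvRots re ro N) (pvBase (pvRots re ro N)) N = some (pvPermSpec re ro N) := by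
  unfold pvPerm
  rw [PySem.List.enumerate_eq_map_pyRange _ ([] : List Int)]
  rw [List.foldl_map]
  have hlenr : PySem.List.len (pvRots re ro N) = ((N.toNat : Nat) : Int) := by
    simp [pvRots_length]
  rw [hlenr, PySem.List.pyRange_one]
  rw [List.foldl_map]
  have hrange : ((((N.toNat : Nat) : Int) - 0).toNat) = N.toNat := by omega
  rw [hrange]
  rw [PySem.List.foldl_congr_mem (List.range N.toNat) _
    (fun acc (a : Nat) =>
      (pvRotAt re ro (a : Int)).foldl
        (fun acc d => acc.bind (fun l =>
          (pvPermEntry (pvRots re ro N) (pvBase (pvRots re ro N)) N (a : Int) d).map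
            (fun e => l ++ [e])))
        acc)
    (some []) ?hcong]
  case hcong =>
    intro acc k hk
    have hk' := List.mem_range.mp hk
    have h0 : (0 : Int) + (k : Int) = (k : Int) := by ring
    rw [h0]
    have hgd : PySem.List.pyGetD (pvRots re ro N) ((k : Nat) : Int) ([] : List Int)
        = pvRotAt re ro (k : Int) := by
      rw [PySem.List.pyGetD_natCast, List.getD_eq_getElem?_getD, pvRots_getElem? re ro hk']
      rfl
    rw [hgd]
  rw [pvPermAux h (List.range N.toNat) [] (fun x hx => List.mem_range.mp hx)]
  rw [List.nil_append]
  rfl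

theorem pvPermSpec_getElem? {re ro : List Int} {N : Int} (h : pvOk re ro N) {a j : Nat}
    (ha : a < N.toNat) (hj : j < re.length) :
    (pvPermSpec re ro N)[a * re.length + j]?
      = some (((pvB' re ro N a j * re.length + pvJ' re ro N a j : Nat) : Int)) := by
  unfold pvPermSpec
  rw [pvBlocks_getElem? _ N.toNat re.length
      (fun i _ => by rw [List.length_map, pvRotAt_length h]) ha hj]
  have hjl : j < (pvRotAt re ro (a : Int)).length := by rw [pvRotAt_length h]; exact hj
  rw [List.getElem?_map, List.getElem?_eq_getElem hjl]
  simp only [Option.map_some]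
  congr 1
  unfold pvFVal pvB' pvJ' pvTgt pvDart
  rw [List.getD_eq_getElem _ 0 hjl]

theorem pvVertSpec_getElem? {re ro : List Int} {N : Int} {a j : Nat}
    (ha : a < N.toNat) (hj : j < re.length) :
    (pvVertSpec re ro N)[a * re.length + j]? = some ((a : Int)) := by
  unfold pvVertSpec
  rw [pvBlocks_getElem? _ N.toNat re.length (fun i _ => List.length_replicate) ha hj]
  exact List.getElem?_replicate_of_lt hj

-- ---- the successor step ----

theorem pvB'_lt {re ro : List Int} {N : Int} (h : pvOk re ro N) (a j : Nat) :
    pvB' re ro N a j < N.toNat := by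
  have hb := pvTgt_bounds (re := re) (ro := ro) (N := N) (a := (a : Int)) h.1 j
  unfold pvB'
  omega

theorem pvJ'_lt {re ro : List Int} {N : Int} (h : pvOk re ro N) {a j : Nat}
    (ha : a < N.toNat) (hj : j < re.length) : pvJ' re ro N a j < re.length := by
  unfold pvJ'
  exact Nat.mod_lt _ (by omega)

theorem pvSuccA_eq {re ro : List Int} {N : Int} (h : pvOk re ro N) {a j : Nat}
    (ha : a < N.toNat) (hj : j < re.length) :
    pvSuccA re ro (pvTgt re ro N (a:Int) j)
        (PySem.Int.mod ((a:Int) - pvTgt re ro N (a:Int) j) N)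
      = some (pvDart re ro ((pvB' re ro N a j : Nat) : Int) (pvJ' re ro N a j)) := by
  have hN := h.1
  have hb := pvTgt_bounds (re := re) (ro := ro) (N := N) (a := (a : Int)) hN j
  have htc : ((pvB' re ro N a j : Nat) : Int) = pvTgt re ro N (a:Int) j := by
    unfold pvB'; exact Int.toNat_of_nonneg hb.1
  have hL : 0 < re.length := by omega
  have hLi : ¬ ((re.length : Int) = 0) := by
    simp only [Int.natCast_eq_zero]; omega
  have hx : PySem.Int.mod ((a:Int) - pvTgt re ro N (a:Int) j) N
      = PySem.Int.mod (-(pvDart re ro (a:Int) j)) N := by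
    unfold pvTgt
    rw [PySem.Int.mod_eq_emod_of_pos hN, PySem.Int.mod_eq_emod_of_pos hN,
        PySem.Int.mod_eq_emod_of_pos hN]
    rw [Int.sub_emod ((a:Int)) _ N, Int.emod_emod_of_dvd _ (dvd_refl N), ← Int.sub_emod]
    congr 1
    ring
  rw [hx]
  have hcl := pvClosure h ha hj
  have hj'eq : ∀ (p : Nat),
      PySem.List.index? (pvRotAt re ro (pvTgt re ro N (a:Int) j))
          (PySem.Int.mod (-(pvDart re ro (a:Int) j)) N) = some p →
      pvJ' re ro N a j = (p + 1) % re.length := by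
    intro p hp
    unfold pvJ'
    rw [hp]
    rfl
  unfold pvSuccA
  by_cases hpar : PySem.Int.mod (pvTgt re ro N (a:Int) j) 2 = 0
  · have hre : pvRotAt re ro (pvTgt re ro N (a:Int) j) = re := by
      unfold pvRotAt; rw [if_pos hpar]
    rw [if_pos hpar]
    rw [hre] at hcl
    obtain ⟨p, hp⟩ := Option.isSome_iff_exists.mp
      ((PySem.List.index?_isSome_iff _ _).mpr hcl)
    have hnd : re.Nodup := by
      have := pvRotAt_nodup h (0 : Int)
      unfold pvRotAt at this
      simpa using this
    rw [pvPos_get? hnd, hp]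
    simp only [Option.pure_def, Option.bind_eq_bind, Option.bind_some, Option.map_some]
    have hmodc : PySem.Int.mod ((p:Int) + 1) ((re.length : Nat) : Int)
        = (((p + 1) % re.length : Nat) : Int) := by
      rw [show ((p:Int) + 1) = (((p + 1 : Nat)) : Int) by push_cast; ring,
          PySem.Int.mod_natCast]
    rw [hmodc, PySem.List.pyGet?_natCast]
    rw [List.getElem?_eq_getElem (Nat.mod_lt _ hL)]
    have hjp := hj'eq p (by rw [hre]; exact hp)
    rw [hjp]
    unfold pvDart
    rw [htc, hre]
    rw [List.getD_eq_getElem _ 0 (by have := pvJ'_lt h ha hj; omega)]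
  · have hro : pvRotAt re ro (pvTgt re ro N (a:Int) j) = ro := by
      unfold pvRotAt; rw [if_neg hpar]
    rw [if_neg hpar]
    rw [hro] at hcl
    obtain ⟨p, hp⟩ := Option.isSome_iff_exists.mp
      ((PySem.List.index?_isSome_iff _ _).mpr hcl)
    have hnd : ro.Nodup := by
      have := pvRotAt_nodup h (1 : Int)
      unfold pvRotAt at this
      simpa using this
    rw [pvPos_get? hnd, hp]
    simp only [Option.pure_def, Option.bind_eq_bind, Option.bind_some, Option.map_some]
    rw [if_neg hLi]
    have hmodc : PySem.Int.mod ((p:Int) + 1) ((re.length : Nat) : Int)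
        = (((p + 1) % re.length : Nat) : Int) := by
      rw [show ((p:Int) + 1) = (((p + 1 : Nat)) : Int) by push_cast; ring,
          PySem.Int.mod_natCast]
    rw [hmodc, PySem.List.pyGet?_natCast]
    rw [List.getElem?_eq_getElem (show (p+1) % re.length < ro.length by
      rw [← h.2.1]; exact Nat.mod_lt _ hL)]
    have hjp := hj'eq p (by rw [hro]; exact hp)
    rw [hjp]
    unfold pvDart
    rw [htc, hro]
    rw [List.getD_eq_getElem _ 0 (by have := pvJ'_lt h ha hj; have := h.2.1; omega)]

-- ---- counting ----

theorem pvCount_le (seen : List Bool) : seen.count false ≤ seen.length := List.count_le_length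

theorem pvCount_set {seen : List Bool} {s : Nat} (hs : s < seen.length)
    (hf : seen[s] = false) : (seen.set s true).count false + 1 = seen.count false := by
  have hmem : false ∈ seen := hf ▸ List.getElem_mem hs
  have hpos : 0 < seen.count false := List.count_pos_iff.mpr hmem
  rw [List.count_set hs, hf]
  simp
  omega

theorem pvAll_true {seen : List Bool} (h : seen.count false = 0) {s : Nat}
    (hs : s < seen.length) : seen[s] = true := by
  have hnm := List.count_eq_zero.mp h
  cases hb : seen[s] with
  | true => rfl
  | false => exact absurd (hb ▸ List.getElem_mem hs) hnm

-- ---- the walk simulation ----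

theorem pvWalk_sim {re ro : List Int} {N : Int} (h : pvOk re ro N) :
    ∀ (u fuelA fuelB : Nat) (vis : PySem.Set (Int × Int)) (seen : List Bool)
      (face : List Int) (a j : Nat), a < N.toNat → j < re.length →
      pvInv re ro N vis seen → seen.count false = u → u < fuelA → u < fuelB →
      (pvWalkA re ro N fuelA vis face (a : Int) (pvTgt re ro N (a:Int) j)).2
          = (pvWalkB (pvPermSpec re ro N) (pvVertSpec re ro N) fuelB seen face
              ((a * re.length + j : Nat) : Int)).2
        ∧ pvInv re ro N (pvWalkA re ro N fuelA vis face (a : Int) (pvTgt re ro N (a:Int) j)).1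
            (pvWalkB (pvPermSpec re ro N) (pvVertSpec re ro N) fuelB seen face
              ((a * re.length + j : Nat) : Int)).1
        ∧ (pvWalkB (pvPermSpec re ro N) (pvVertSpec re ro N) fuelB seen face
              ((a * re.length + j : Nat) : Int)).1.count false
            ≤ seen.count false := by
  intro u
  induction u with
  | zero =>
    intro fuelA fuelB vis seen face a j ha hj hinv hcount hfa hfb
    obtain ⟨fa, rfl⟩ : ∃ fa, fuelA = fa + 1 := ⟨fuelA - 1, by omega⟩
    obtain ⟨fb, rfl⟩ : ∃ fb, fuelB = fb + 1 := ⟨fuelB - 1, by omega⟩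
    obtain ⟨hlen, hmem, hcl⟩ := hinv
    have hslot : a * re.length + j < seen.length := by
      rw [hlen]
      calc a * re.length + j < a * re.length + re.length := by omega
        _ = (a + 1) * re.length := by ring
        _ ≤ N.toNat * re.length := Nat.mul_le_mul_right _ (by omega)
    have htrue : seen[a * re.length + j] = true := pvAll_true hcount hslot
    have hgd : seen.getD (a * re.length + j) false = true := by
      rw [List.getD_eq_getElem _ _ hslot, htrue]
    have hin : pvEdge re ro N a j ∈ vis := (hmem a j ha hj).mpr hgd
    have hinp : ((a : Int), pvTgt re ro N (a:Int) j) ∈ vis := hin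
    have hBget : PySem.List.pyGet? seen ((a * re.length + j : Nat) : Int)
        = some true := by
      rw [PySem.List.pyGet?_natCast, List.getElem?_eq_getElem hslot, htrue]
    simp only [pvWalkA, pvWalkB, hBget, if_pos hinp]
    exact ⟨trivial, ⟨hlen, hmem, hcl⟩, le_refl _⟩
  | succ u ih =>
    intro fuelA fuelB vis seen face a j ha hj hinv hcount hfa hfb
    obtain ⟨fa, rfl⟩ : ∃ fa, fuelA = fa + 1 := ⟨fuelA - 1, by omega⟩
    obtain ⟨fb, rfl⟩ : ∃ fb, fuelB = fb + 1 := ⟨fuelB - 1, by omega⟩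
    obtain ⟨hlen, hmem, hcl⟩ := hinv
    have hslot : a * re.length + j < seen.length := by
      rw [hlen]
      calc a * re.length + j < a * re.length + re.length := by omega
        _ = (a + 1) * re.length := by ring
        _ ≤ N.toNat * re.length := Nat.mul_le_mul_right _ (by omega)
    by_cases hv : seen[a * re.length + j] = true
    · have hgd : seen.getD (a * re.length + j) false = true := by
        rw [List.getD_eq_getElem _ _ hslot, hv]
      have hin : pvEdge re ro N a j ∈ vis := (hmem a j ha hj).mpr hgd
      have hinp : ((a : Int), pvTgt re ro N (a:Int) j) ∈ vis := hin
      have hBget : PySem.List.pyGet? seen ((a * re.length + j : Nat) : Int)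
          = some true := by
        rw [PySem.List.pyGet?_natCast, List.getElem?_eq_getElem hslot, hv]
      simp only [pvWalkA, pvWalkB, hBget, if_pos hinp]
      exact ⟨trivial, ⟨hlen, hmem, hcl⟩, le_refl _⟩
    · have hvf : seen[a * re.length + j] = false := by
        cases hx : seen[a * re.length + j]
        · rfl
        · exact absurd hx hv
      have hgd : seen.getD (a * re.length + j) false = false := by
        rw [List.getD_eq_getElem _ _ hslot, hvf]
      have hnin : pvEdge re ro N a j ∉ vis := by
        rw [hmem a j ha hj, hgd]
        simp
      have hninp : ((a : Int), pvTgt re ro N (a:Int) j) ∉ vis := hnin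
      have hBget : PySem.List.pyGet? seen ((a * re.length + j : Nat) : Int)
          = some false := by
        rw [PySem.List.pyGet?_natCast, List.getElem?_eq_getElem hslot, hvf]
      -- the marked states
      have hset : pySetTrue seen ((a * re.length + j : Nat) : Int)
          = seen.set (a * re.length + j) true := by
        unfold pySetTrue
        rw [if_pos (Int.natCast_nonneg _), Int.toNat_natCast]
      have hvert : PySem.List.pyGet? (pvVertSpec re ro N)
          ((a * re.length + j : Nat) : Int) = some ((a : Int)) := by
        rw [PySem.List.pyGet?_natCast]
        exact pvVertSpec_getElem? ha hj
      have hperm : PySem.List.pyGet? (pvPermSpec re ro N)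
          ((a * re.length + j : Nat) : Int)
          = some (((pvB' re ro N a j * re.length + pvJ' re ro N a j : Nat) : Int)) := by
        rw [PySem.List.pyGet?_natCast]
        exact pvPermSpec_getElem? h ha hj
      have hsucc := pvSuccA_eq h ha hj
      have htc : ((pvB' re ro N a j : Nat) : Int) = pvTgt re ro N (a:Int) j := by
        unfold pvB'
        exact Int.toNat_of_nonneg (pvTgt_bounds h.1 j).1
      -- next-edge target rewriting
      have hnext : PySem.Int.mod (pvTgt re ro N (a:Int) j
            + pvDart re ro ((pvB' re ro N a j : Nat) : Int) (pvJ' re ro N a j)) N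
          = pvTgt re ro N ((pvB' re ro N a j : Nat) : Int) (pvJ' re ro N a j) := by
        rw [← htc]
        rfl
      -- the new invariant
      have hinv' : pvInv re ro N (PySem.Set.add vis (pvEdge re ro N a j))
          (seen.set (a * re.length + j) true) := by
        refine ⟨by rw [List.length_set]; exact hlen, ?_, ?_⟩
        · intro a'' j'' ha'' hj''
          have hslot'' : a'' * re.length + j'' < seen.length := by
            rw [hlen]
            calc a'' * re.length + j'' < a'' * re.length + re.length := by omega
              _ = (a'' + 1) * re.length := by ring
              _ ≤ N.toNat * re.length := Nat.mul_le_mul_right _ (by omega)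
          rw [PySem.Set.mem_add]
          by_cases hsame : a'' = a ∧ j'' = j
          · obtain ⟨rfl, rfl⟩ := hsame
            have : (seen.set (a'' * re.length + j'') true).getD
                (a'' * re.length + j'') false = true := by
              rw [List.getD_eq_getElem?_getD, List.getElem?_set_self hslot'']
              rfl
            rw [this]
            simp
          · have hslotne : a'' * re.length + j'' ≠ a * re.length + j := by
              intro hslq
              exact hsame (pvSlot_inj hj'' hj hslq)
            have hedgene : pvEdge re ro N a'' j'' ≠ pvEdge re ro N a j := by
              intro heq
              obtain ⟨h1, h2⟩ := pvEdge_inj h ha'' hj'' ha hj heq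
              exact hsame ⟨h1, h2⟩
            have : (seen.set (a * re.length + j) true).getD
                (a'' * re.length + j'') false
                = seen.getD (a'' * re.length + j'') false := by
              rw [List.getD_eq_getElem?_getD, List.getD_eq_getElem?_getD,
                  List.getElem?_set_ne (Ne.symm hslotne)]
            rw [this, ← hmem a'' j'' ha'' hj'']
            constructor
            · intro hc
              rcases hc with hc | hc
              · exact hc
              · exact absurd hc hedgene
            · intro hc
              exact Or.inl hc
        · intro e he
          rw [PySem.Set.mem_add] at he
          rcases he with he | he
          · exact hcl e he
          · exact ⟨a, j, ha, hj, he⟩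
      have hcount' : (seen.set (a * re.length + j) true).count false = u := by
        have := pvCount_set hslot hvf
        omega
      have hih := ih fa fb (PySem.Set.add vis (pvEdge re ro N a j))
        (seen.set (a * re.length + j) true) (face ++ [(a : Int)])
        (pvB' re ro N a j) (pvJ' re ro N a j) (pvB'_lt h a j) (pvJ'_lt h ha hj)
        hinv' hcount' (by omega) (by omega)
      -- reduce one step of both walks
      have hA : pvWalkA re ro N (fa + 1) vis face (a : Int) (pvTgt re ro N (a:Int) j)
          = pvWalkA re ro N fa (PySem.Set.add vis (pvEdge re ro N a j))
              (face ++ [(a : Int)]) ((pvB' re ro N a j : Nat) : Int)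
              (pvTgt re ro N ((pvB' re ro N a j : Nat) : Int) (pvJ' re ro N a j)) := by
        simp only [pvWalkA, if_neg hninp, hsucc]
        unfold pvEdge
        rw [hnext, htc]
      have hB : pvWalkB (pvPermSpec re ro N) (pvVertSpec re ro N) (fb + 1) seen face
            ((a * re.length + j : Nat) : Int)
          = pvWalkB (pvPermSpec re ro N) (pvVertSpec re ro N) fb
              (seen.set (a * re.length + j) true) (face ++ [(a : Int)])
              ((pvB' re ro N a j * re.length + pvJ' re ro N a j : Nat) : Int) := by
        simp only [pvWalkB, hBget, hvert, hperm, hset]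
      rw [hA, hB]
      refine ⟨hih.1, hih.2.1, ?_⟩
      calc (pvWalkB (pvPermSpec re ro N) (pvVertSpec re ro N) fb
            (seen.set (a * re.length + j) true) (face ++ [(a : Int)])
            ((pvB' re ro N a j * re.length + pvJ' re ro N a j : Nat) : Int)).1.count false
          ≤ (seen.set (a * re.length + j) true).count false := hih.2.2
        _ ≤ seen.count false := by omega

-- ---- outer loop ----

-- relational fold
theorem pvFoldl_rel {α β γ : Type} (R : α → β → Prop) (f : α → γ → α) (g : β → γ → β)
    (l : List γ) {i : α} {i' : β} (hi : R i i')
    (hstep : ∀ st st' x, x ∈ l → R st st' → R (f st x) (g st' x)) :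
    R (l.foldl f i) (l.foldl g i') := by
  induction l generalizing i i' with
  | nil => exact hi
  | cons x l ih =>
    rw [List.foldl_cons, List.foldl_cons]
    exact ih (hstep i i' x (by simp) hi) (fun st st' y hy hr => hstep st st' y (by simp [hy]) hr)

theorem pvFoldl_flatMap {α β σ : Type} (l : List α) (f : α → List β)
    (F : σ → β → σ) (init : σ) :
    (l.flatMap f).foldl F init = l.foldl (fun s a => (f a).foldl F s) init := by
  induction l generalizing init with
  | nil => simp
  | cons a l ih => simp [List.flatMap_cons, List.foldl_append, ih]

theorem pvRange_mul (n L : Nat) :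
    List.range (n * L) = (List.range n).flatMap (fun a => (List.range L).map (a * L + ·)) := by
  induction n with
  | zero => simp
  | succ n ih =>
    have hm : (n + 1) * L = n * L + L := by ring
    rw [hm, List.range_add, ih, List.range_succ, List.flatMap_append,
        List.flatMap_singleton]

-- named fold bodies of the two outer loops, over slot pairs (a, j)
def pvStepA (re ro : List Int) (N : Int)
    (st : PySem.Set (Int × Int) × List (List Int)) (p : Nat × Nat) :
    PySem.Set (Int × Int) × List (List Int) :=
  let b0 := pvTgt re ro N (p.1 : Int) p.2
  if ((p.1 : Int), b0) ∈ st.1 then st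
  else
    let r := pvWalkA re ro N (N * (N - 1) + 1).toNat st.1 [] (p.1 : Int) b0
    (r.1, st.2 ++ [r.2])

def pvStepB (re ro : List Int) (N : Int)
    (st : List Bool × List (List Int)) (p : Nat × Nat) :
    List Bool × List (List Int) :=
  match PySem.List.pyGet? st.1 ((p.1 * re.length + p.2 : Nat) : Int) with
  | some true => st
  | some false =>
    let r := pvWalkB (pvPermSpec re ro N) (pvVertSpec re ro N)
      (N.toNat * re.length + 1) st.1 [] ((p.1 * re.length + p.2 : Nat) : Int)
    (r.1, st.2 ++ [r.2])
  | none => st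

def pvSlots (re : List Int) (N : Int) : List (Nat × Nat) :=
  (List.range N.toNat).flatMap (fun a => (List.range re.length).map (fun j => (a, j)))

theorem pvSlots_mem {re : List Int} {N : Int} {p : Nat × Nat} (hp : p ∈ pvSlots re N) :
    p.1 < N.toNat ∧ p.2 < re.length := by
  unfold pvSlots at hp
  rw [List.mem_flatMap] at hp
  obtain ⟨a, ha, hp⟩ := hp
  rw [List.mem_map] at hp
  obtain ⟨j, hj, rfl⟩ := hp
  exact ⟨List.mem_range.mp ha, List.mem_range.mp hj⟩

theorem pvStep_rel {re ro : List Int} {N : Int} (h : pvOk re ro N)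
    {p : Nat × Nat} (hp : p ∈ pvSlots re N)
    {st : PySem.Set (Int × Int) × List (List Int)} {st' : List Bool × List (List Int)}
    (hr : st.2 = st'.2 ∧ pvInv re ro N st.1 st'.1) :
    (pvStepA re ro N st p).2 = (pvStepB re ro N st' p).2
      ∧ pvInv re ro N (pvStepA re ro N st p).1 (pvStepB re ro N st' p).1 := by
  obtain ⟨a, j⟩ := p
  obtain ⟨ha, hj⟩ := pvSlots_mem hp
  obtain ⟨hfaces, hinv⟩ := hr
  obtain ⟨hlen, hmem, hcl⟩ := hinv
  have hslot : a * re.length + j < st'.1.length := by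
    rw [hlen]
    calc a * re.length + j < a * re.length + re.length := by omega
      _ = (a + 1) * re.length := by ring
      _ ≤ N.toNat * re.length := Nat.mul_le_mul_right _ (by omega)
  have hget : PySem.List.pyGet? st'.1 ((a * re.length + j : Nat) : Int)
      = some (st'.1[a * re.length + j]) := by
    rw [PySem.List.pyGet?_natCast, List.getElem?_eq_getElem hslot]
  unfold pvStepA pvStepB
  dsimp only
  rw [hget]
  by_cases hv : st'.1[a * re.length + j] = true
  · have hgd : st'.1.getD (a * re.length + j) false = true := by
      rw [List.getD_eq_getElem _ _ hslot, hv]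
    have hinp : ((a : Int), pvTgt re ro N (a:Int) j) ∈ st.1 := (hmem a j ha hj).mpr hgd
    rw [hv, if_pos hinp]
    exact ⟨hfaces, hlen, hmem, hcl⟩
  · have hvf : st'.1[a * re.length + j] = false := by
      cases hx : st'.1[a * re.length + j]
      · rfl
      · exact absurd hx hv
    have hgd : st'.1.getD (a * re.length + j) false = false := by
      rw [List.getD_eq_getElem _ _ hslot, hvf]
    have hninp : ((a : Int), pvTgt re ro N (a:Int) j) ∉ st.1 := by
      have := hmem a j ha hj
      unfold pvEdge at this
      rw [this, hgd]
      simp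
    rw [hvf, if_neg hninp]
    have hN := h.1
    have hcap0 : 0 ≤ N * (N - 1) := Int.mul_nonneg (by omega) (by omega)
    have hcapnn : (N * (N - 1)).toNat = N.toNat * (N - 1).toNat :=
      Int.toNat_mul (by omega) (by omega)
    have hLle : re.length ≤ (N - 1).toNat := pvLn_le h
    have hu1 : st'.1.count false ≤ N.toNat * re.length := by
      have := pvCount_le st'.1
      omega
    have hu2 : N.toNat * re.length ≤ N.toNat * (N - 1).toNat :=
      Nat.mul_le_mul_left _ hLle
    have hfa : st'.1.count false < (N * (N - 1) + 1).toNat := by omega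
    have hfb : st'.1.count false < N.toNat * re.length + 1 := by omega
    have hsim := pvWalk_sim h (st'.1.count false) (N * (N - 1) + 1).toNat
      (N.toNat * re.length + 1) st.1 st'.1 [] a j ha hj ⟨hlen, hmem, hcl⟩ rfl hfa hfb
    refine ⟨?_, hsim.2.1⟩
    rw [hfaces, hsim.1]

theorem pvA_norm {re ro : List Int} {N : Int} (h : pvOk re ro N) :
    trace_faces_z6 re ro N
      = ((pvSlots re N).foldl (pvStepA re ro N)
          (PySem.Set.empty, ([] : List (List Int)))).2 := by
  have hN := h.1
  unfold trace_faces_z6 pvSlots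
  dsimp only
  congr 1
  rw [pvFoldl_flatMap]
  rw [PySem.List.pyRange_one]
  rw [List.foldl_map]
  have hNn : ((N : Int) - 0).toNat = N.toNat := by omega
  rw [hNn]
  apply PySem.List.foldl_congr_mem
  intro st a ha
  have haN : a < N.toNat := List.mem_range.mp ha
  have h0 : (0 : Int) + (a : Int) = (a : Int) := by ring
  rw [h0]
  rw [List.foldl_map]
  rw [show (if PySem.Int.mod ((a : Nat) : Int) 2 = 0 then re else ro)
      = pvRotAt re ro ((a : Nat) : Int) from rfl]
  rw [← PySem.List.foldl_pyRange_zero_pyGetD' (pvRotAt re ro (a : Int)) (0 : Int) _ st]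
  rw [pvRotAt_length h]
  rw [PySem.List.pyRange_one]
  rw [List.foldl_map]
  have hL0 : ((re.length : Int) - 0).toNat = re.length := by omega
  rw [hL0]
  apply PySem.List.foldl_congr_mem
  intro st' j hj
  have h0' : (0 : Int) + (j : Int) = (j : Int) := by ring
  rw [h0']
  rw [PySem.List.pyGetD_natCast]
  rfl

theorem pvB_norm {re ro : List Int} {N : Int} (h : pvOk re ro N) :
    trace_faces_z6_alt re ro N
      = ((pvSlots re N).foldl (pvStepB re ro N)
          (List.replicate (N.toNat * re.length) false, ([] : List (List Int)))).2 := by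
  have hN := h.1
  unfold trace_faces_z6_alt
  dsimp only
  rw [pvPerm_spec h]
  dsimp only
  rw [pvBase_getLast (pvRots_all_len h), pvRots_length]
  rw [pvVert_spec (pvRots_all_len h), pvRots_length]
  rw [Int.toNat_natCast]
  congr 1
  rw [PySem.List.pyRange_one]
  rw [List.foldl_map]
  have hS : (((N.toNat * re.length : Nat) : Int) - 0).toNat = N.toNat * re.length := by omega
  rw [hS]
  rw [pvRange_mul N.toNat re.length]
  rw [pvFoldl_flatMap]
  unfold pvSlots
  rw [pvFoldl_flatMap]
  apply PySem.List.foldl_congr_mem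
  intro st a ha
  rw [List.foldl_map, List.foldl_map]
  apply PySem.List.foldl_congr_mem
  intro st' j hj
  have h0 : (0 : Int) + ((a * re.length + j : Nat) : Int) = ((a * re.length + j : Nat) : Int) := by
    ring
  rw [h0]
  rfl

theorem pvMain_pos (re ro : List Int) (N : Int) (h : pvOk re ro N) :
    trace_faces_z6 re ro N = trace_faces_z6_alt re ro N := by
  rw [pvA_norm h, pvB_norm h]
  have hgd : ∀ i : Nat,
      (List.replicate (N.toNat * re.length) false).getD i false = false := by
    intro i
    rw [List.getD_eq_getElem?_getD]
    rcases Nat.lt_or_ge i (N.toNat * re.length) with hi | hi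
    · rw [List.getElem?_replicate_of_lt hi]
      rfl
    · rw [List.getElem?_eq_none (by simpa using hi)]
      rfl
  have hinit : ((PySem.Set.empty : PySem.Set (Int × Int)), ([] : List (List Int))).2
        = ((List.replicate (N.toNat * re.length) false, ([] : List (List Int)))).2
      ∧ pvInv re ro N PySem.Set.empty (List.replicate (N.toNat * re.length) false) := by
    refine ⟨rfl, by simp, ?_, ?_⟩
    · intro a j ha hj
      constructor
      · intro hc
        exact absurd hc (by simp [pysem])
      · intro hc
        rw [hgd] at hc
        cases hc
    · intro e he
      exact absurd he (by simp [pysem])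
  have hfold := pvFoldl_rel
    (fun stA stB => stA.2 = stB.2 ∧ pvInv re ro N stA.1 stB.1)
    (pvStepA re ro N) (pvStepB re ro N) (pvSlots re N) hinit
    (fun st st' x hx hr => pvStep_rel h hx hr)
  exact hfold.1

theorem pvMain_nonpos (re ro : List Int) (N : Int) (hN : N ≤ 0) :
    trace_faces_z6 re ro N = trace_faces_z6_alt re ro N := by
  unfold trace_faces_z6 trace_faces_z6_alt pvRots
  simp only [PySem.List.pyRange_one_eq_nil hN]
  rfl


-- ===== VERDICT (by name: the statement is the Claim_ definition above) =====
theorem trace_faces_z6_spec : Claim_equal_trace_faces_z6 := by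
  intro re ro N _ hpre
  unfold Spec_trace_faces_z6
  by_cases hN : N ≤ 0
  · exact pvMain_nonpos re ro N hN
  · rcases hpre with hN' | ⟨hlen, hdis, hclo⟩
    · exact pvMain_nonpos re ro N hN'
    · exact pvMain_pos re ro N ⟨by omega, hlen, hdis, hclo⟩
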